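-- pv_equiv track=rewrite | github.com/neryguilherme/thegamelibrary | pages/prediction.py | process_genres
-- ===== SOURCE A (Python) =====
-- def process_genres(genres_str):
--     if not isinstance(genres_str, str):
--         return "Outros"
--
--     genres = set(g.strip() for g in genres_str.split(','))
--     valid_genres = {"Indie", "Action", "Casual"}
--
--     filtered_genres = sorted(valid_genres.intersection(genres))
--     if len(filtered_genres) < len(genres):
--         filtered_genres.append("Outros")
--
--     return ", ".join(filtered_genres)
-- ===== SOURCE B (Python) =====
-- def process_genres(genres_str):
--     if not isinstance(genres_str, str):
--         return "Outros"
--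
--     tokens = [g.strip() for g in genres_str.split(',')]
--     # Probe the (already alphabetically ordered) fixed candidates against the
--     # tokens; no set is built and nothing is sorted.
--     parts = [v for v in ("Action", "Casual", "Indie") if v in tokens]
--     if any(t not in ("Action", "Casual", "Indie") for t in tokens):
--         parts.append("Outros")
--     return ", ".join(parts)
-- ===== Notes on version B (the rewrite author's own statement) =====
-- stated objective: alternative
-- what changed: Instead of collecting tokens into a set, intersecting with the valid set and sorting, B probes the three fixed candidates (listed in their alphabetical order) for membership in the token list, so no set is built and no sort is performed; the Outros case is one any() pass over the tokens.
import Mathlib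
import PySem

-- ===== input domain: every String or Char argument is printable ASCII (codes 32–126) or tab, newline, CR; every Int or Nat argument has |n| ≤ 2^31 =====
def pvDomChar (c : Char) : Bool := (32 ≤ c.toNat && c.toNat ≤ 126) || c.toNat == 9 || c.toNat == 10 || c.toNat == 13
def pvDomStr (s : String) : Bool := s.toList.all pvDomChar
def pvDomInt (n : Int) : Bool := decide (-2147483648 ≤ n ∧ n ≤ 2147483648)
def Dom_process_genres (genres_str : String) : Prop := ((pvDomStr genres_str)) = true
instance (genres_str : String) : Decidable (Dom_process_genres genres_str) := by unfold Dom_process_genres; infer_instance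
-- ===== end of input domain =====

-- B replaces A's token-set construction, set intersection and sort by probing the three fixed
-- candidates (written in their alphabetical order) for membership in the token list, plus one
-- any() pass for the Outros case (alternative decomposition, same cost).
-- The Lean argument is a String, so A's isinstance guard is always passed; both ports omit it.

-- ===== PORT A =====
-- genres = set(g.strip() for g in genres_str.split(','))  (split? is some: sep "," ≠ "")
def process_genres (genres_str : String) : String :=
  let genres : PySem.Set String :=
    PySem.Set.ofList (((PySem.Str.split? genres_str ",").getD []).map PySem.Str.strip)
  let valid_genres : PySem.Set String := PySem.Set.ofList ["Indie", "Action", "Casual"]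
  let filtered_genres := PySem.List.sorted (PySem.Set.inter valid_genres genres) (fun x => x) false
  let filtered_genres :=
    if PySem.Set.len filtered_genres < PySem.Set.len genres then filtered_genres ++ ["Outros"]
    else filtered_genres
  PySem.Str.join ", " filtered_genres

-- ===== PORT B =====
-- tokens = stripped split; parts = fixed candidates present among tokens; Outros iff any invalid token
def process_genres_alt (genres_str : String) : String :=
  let tokens := ((PySem.Str.split? genres_str ",").getD []).map PySem.Str.strip
  let parts := (["Action", "Casual", "Indie"] : List String).filter (fun v => tokens.contains v)
  let parts :=
    if tokens.any (fun t => !(["Action", "Casual", "Indie"] : List String).contains t)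
    then parts ++ ["Outros"] else parts
  PySem.Str.join ", " parts

-- ===== PRECONDITION & SPEC =====
def Spec_process_genres (genres_str : String) (out : String) : Prop := out = process_genres_alt genres_str
instance (genres_str : String) (out : String) : Decidable (Spec_process_genres genres_str out) := by unfold Spec_process_genres; infer_instance

-- ===== CLAIM (what is proved, stated in full; the proofs are below) =====
def Claim_equal_process_genres : Prop := ∀ (genres_str : String), Dom_process_genres genres_str → Spec_process_genres genres_str (process_genres genres_str)

-- ===== LEMMAS AND PROOFS =====

-- A's sorted intersection IS B's filter of the alphabetically listed candidates:
-- the filter is a ≤-ordered rearrangement of the intersection.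
theorem pv_sorted_eq (ts : List String) :
    PySem.List.sorted
        (PySem.Set.inter (PySem.Set.ofList ["Indie", "Action", "Casual"]) (PySem.Set.ofList ts))
        (fun x => x) false
      = (["Action", "Casual", "Indie"] : List String).filter (fun v => ts.contains v) := by
  apply PySem.List.sorted_id_eq_of_perm_of_pairwise
  · rw [List.perm_ext_iff_of_nodup (List.Nodup.filter _ (by decide))
      (PySem.Set.nodup_inter _ _ (by decide))]
    intro x
    simp only [List.mem_filter, PySem.Set.inter, PySem.Set.mem_ofList, List.contains_eq_mem,
      decide_eq_true_eq, List.mem_cons, List.not_mem_nil, PySem.Set.contains_iff,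
      PySem.Set.mem_ofList]
    tauto
  · have hAC : ("Action" : String) < "Casual" := by rw [String.lt_iff_toList_lt]; decide
    have hAI : ("Action" : String) < "Indie" := by rw [String.lt_iff_toList_lt]; decide
    have hCI : ("Casual" : String) < "Indie" := by rw [String.lt_iff_toList_lt]; decide
    have hpw : (["Action", "Casual", "Indie"] : List String).Pairwise (· ≤ ·) := by
      refine List.Pairwise.cons ?_ (List.Pairwise.cons ?_ (List.Pairwise.cons ?_ List.Pairwise.nil))
      · intro b hb
        simp only [List.mem_cons, List.not_mem_nil, or_false] at hb
        rcases hb with rfl | rfl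
        · exact hAC.le
        · exact hAI.le
      · intro b hb
        simp only [List.mem_cons, List.not_mem_nil, or_false] at hb
        subst hb
        exact hCI.le
      · exact fun b hb => nomatch hb
    exact List.Pairwise.sublist List.filter_sublist hpw

theorem pv_filter_length (l : List String) (p : String → Bool) :
    (l.filter p).length + (l.filter (fun x => !p x)).length = l.length := by
  induction l with
  | nil => rfl
  | cons x xs ih =>
    by_cases h : p x = true <;> simp [h, ← ih] <;> omega

-- A's cardinality test ↔ B's any() pass: |valid ∩ set(ts)| < |set(ts)| iff some token is invalid.
theorem pv_cond_iff (ts : List String) :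
    ((PySem.Set.inter (PySem.Set.ofList ["Indie", "Action", "Casual"]) (PySem.Set.ofList ts)
          : List String).length
        < (PySem.Set.ofList ts : List String).length)
      ↔ (ts.any (fun t => !(["Action", "Casual", "Indie"] : List String).contains t) = true) := by
  have hperm : (PySem.Set.inter (PySem.Set.ofList ["Indie", "Action", "Casual"])
        (PySem.Set.ofList ts) : List String).Perm
      ((PySem.Set.ofList ts : List String).filter
        (fun t => (["Action", "Casual", "Indie"] : List String).contains t)) := by
    rw [List.perm_ext_iff_of_nodup (PySem.Set.nodup_inter _ _ (by decide))
      (List.Nodup.filter _ (PySem.Set.nodup_ofList _))]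
    intro x
    simp only [List.mem_filter, PySem.Set.inter, PySem.Set.mem_ofList, List.contains_eq_mem,
      decide_eq_true_eq, List.mem_cons, List.not_mem_nil, PySem.Set.contains_iff,
      PySem.Set.mem_ofList]
    tauto
  rw [hperm.length_eq]
  rw [← pv_filter_length (PySem.Set.ofList ts)
    (fun t => (["Action", "Casual", "Indie"] : List String).contains t)]
  constructor
  · intro h
    have hpos : 0 < ((PySem.Set.ofList ts : List String).filter
        (fun x => !(["Action", "Casual", "Indie"] : List String).contains x)).length := by omega
    obtain ⟨x, hmem⟩ := List.exists_mem_of_length_pos hpos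
    rw [List.mem_filter, PySem.Set.mem_ofList] at hmem
    rw [List.any_eq_true]
    exact ⟨x, hmem.1, hmem.2⟩
  · intro h
    rw [List.any_eq_true] at h
    obtain ⟨x, hx, hpx⟩ := h
    have hmem : x ∈ (PySem.Set.ofList ts : List String).filter
        (fun x => !(["Action", "Casual", "Indie"] : List String).contains x) := by
      rw [List.mem_filter, PySem.Set.mem_ofList]; exact ⟨hx, hpx⟩
    have := List.length_pos_of_mem hmem
    omega

-- ===== VERDICT (by name: the statement is the Claim_ definition above) =====
theorem process_genres_spec : Claim_equal_process_genres := by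
  intro genres_str _
  unfold Spec_process_genres process_genres process_genres_alt
  simp only [pv_sorted_eq]
  refine congrArg (PySem.Str.join ", ") (if_congr ?_ rfl rfl)
  rw [PySem.Set.len, PySem.Set.len, ← pv_sorted_eq, PySem.List.length_sorted, Nat.cast_lt]
  exact pv_cond_iff _
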